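-- pv_equiv track=rewrite | github.com/k3uual/coding-problems | TUF/a_to_z/Arrays/max_prod_sum.py | max_prod_sum
-- ===== SOURCE A (Python) =====
-- def max_prod_sum(a):
--     mx = 0
--     prod = 1
--
--     for i in range(len(a)):
--         prod *= a[i]
--         if(prod > mx):
--             mx = prod
--         if(prod == 0):
--             prod = 1
--
--     return mx
-- ===== SOURCE B (Python) =====
-- def max_prod_sum(a):
--     # Two-phase: split into maximal zero-free runs, list all prefix products, one max.
--     segments = []
--     cur = []
--     for x in a:
--         if x == 0:
--             segments.append(cur)
--             cur = []
--         else: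
--             cur.append(x)
--     segments.append(cur)
--
--     candidates = [0]
--     for seg in segments:
--         p = 1
--         for x in seg:
--             p *= x
--             candidates.append(p)
--     return max(candidates)
-- ===== Notes on version B (the rewrite author's own statement) =====
-- stated objective: alternative
-- what changed: Replaces A's single flat loop with running max and in-loop zero reset by a two-phase decomposition: split the list into maximal zero-free segments, collect every segment's prefix products into a candidate list seeded with 0, and take one max() at the end.
import Mathlib
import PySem

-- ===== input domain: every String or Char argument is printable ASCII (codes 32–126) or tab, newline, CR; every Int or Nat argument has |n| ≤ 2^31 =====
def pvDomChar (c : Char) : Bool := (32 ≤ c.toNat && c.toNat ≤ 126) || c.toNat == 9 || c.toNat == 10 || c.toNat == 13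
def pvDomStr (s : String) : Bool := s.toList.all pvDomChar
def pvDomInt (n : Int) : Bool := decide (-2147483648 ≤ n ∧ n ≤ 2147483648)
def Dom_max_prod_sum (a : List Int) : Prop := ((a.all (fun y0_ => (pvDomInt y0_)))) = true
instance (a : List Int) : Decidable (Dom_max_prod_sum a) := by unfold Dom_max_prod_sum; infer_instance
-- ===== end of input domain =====

-- B re-implements A's flat running-max/reset loop as a two-phase decomposition (split on
-- zeros, list every segment's prefix products, one final max); alternative, same cost.

-- ===== PORT A =====
def pvStepA (s : Int × Int) (x : Int) : Int × Int :=
  let prod := s.2 * x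
  let mx := if prod > s.1 then prod else s.1
  let prod := if prod = 0 then 1 else prod
  (mx, prod)

def max_prod_sum (a : List Int) : Int :=
  ((PySem.List.pyRange 0 (PySem.List.len a) 1).foldl
    (fun s i => pvStepA s (PySem.List.pyGetD a i 0)) ((0 : Int), (1 : Int))).1

-- ===== PORT B =====
-- the split-on-zeros loop body
def pvStepSplit (s : List (List Int) × List Int) (x : Int) : List (List Int) × List Int :=
  if x = 0 then (s.1 ++ [s.2], []) else (s.1, s.2 ++ [x])

-- the inner prefix-product loop body (candidate list, running product)
def pvStepInner (s : List Int × Int) (x : Int) : List Int × Int :=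
  (s.1 ++ [s.2 * x], s.2 * x)

def max_prod_sum_alt (a : List Int) : Int :=
  let sp := a.foldl pvStepSplit ([], [])
  let segments := sp.1 ++ [sp.2]
  let candidates := segments.foldl (fun c seg => (seg.foldl pvStepInner (c, 1)).1) [(0 : Int)]
  (PySem.List.max? candidates (fun y => y)).getD 0

-- ===== PRECONDITION & SPEC =====
def Spec_max_prod_sum (a : List Int) (out : Int) : Prop := out = max_prod_sum_alt a
instance (a : List Int) (out : Int) : Decidable (Spec_max_prod_sum a out) := by unfold Spec_max_prod_sum; infer_instance

-- ===== CLAIM (what is proved, stated in full; the proofs are below) =====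
def Claim_equal_max_prod_sum : Prop := ∀ (a : List Int), Dom_max_prod_sum a → Spec_max_prod_sum a (max_prod_sum a)

-- ===== LEMMAS AND PROOFS =====

-- maximal zero-free runs of the input, with the pending run as accumulator
def pvSplitRec : List Int → List Int → List (List Int)
  | cur, [] => [cur]
  | cur, x :: xs => if x = 0 then cur :: pvSplitRec [] xs else pvSplitRec (cur ++ [x]) xs

-- prefix products of a run, scaled by p
def pvProds (p : Int) : List Int → List Int
  | [] => []
  | x :: xs => (p * x) :: pvProds (p * x) xs

theorem pvProds_append (l : List Int) (p x : Int) :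
    pvProds p (l ++ [x]) = pvProds p l ++ [p * l.prod * x] := by
  induction l generalizing p with
  | nil => simp [pvProds]
  | cons z l ih => simp [pvProds, ih, List.prod_cons, mul_assoc]

theorem pvInner_eq (seg l : List Int) (p : Int) :
    (seg.foldl pvStepInner (l, p)).1 = l ++ pvProds p seg := by
  induction seg generalizing l p with
  | nil => simp [pvProds]
  | cons x s ih => simp [pvStepInner, pvProds, ih]

theorem pvOuter_eq (segs : List (List Int)) (c : List Int) :
    segs.foldl (fun c seg => (seg.foldl pvStepInner (c, 1)).1) c
      = c ++ segs.flatMap (pvProds 1) := by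
  induction segs generalizing c with
  | nil => simp
  | cons s segs ih => simp [pvInner_eq, List.flatMap]

theorem pvSplit_eq (xs : List Int) (segs : List (List Int)) (cur : List Int) :
    (xs.foldl pvStepSplit (segs, cur)).1 ++ [(xs.foldl pvStepSplit (segs, cur)).2]
      = segs ++ pvSplitRec cur xs := by
  induction xs generalizing segs cur with
  | nil => simp [pvSplitRec]
  | cons x xs ih =>
    by_cases h : x = 0 <;> simp [pvStepSplit, pvSplitRec, h, ih]

theorem pvAlt_eq (a : List Int) :
    max_prod_sum_alt a = (((pvSplitRec [] a).flatMap (pvProds 1)).foldl max 0) := by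
  unfold max_prod_sum_alt
  dsimp only
  have hs := pvSplit_eq a [] []
  simp only [List.nil_append] at hs
  rw [hs, pvOuter_eq]
  simp [PySem.List.max?_id_cons]

theorem pvFoldMax_absorb (l : List Int) (m : Int) (h : ∀ y ∈ l, y ≤ m) :
    l.foldl max m = m := by
  induction l generalizing m with
  | nil => rfl
  | cons x l ih =>
    have hx : max m x = m := by have := h x (by simp); omega
    simp only [List.foldl_cons, hx]
    exact ih m (fun y hy => h y (by simp [hy]))

theorem pvFoldMax_pull (l : List Int) (m y : Int) :
    l.foldl max (max m y) = max (l.foldl max m) y := by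
  induction l generalizing m with
  | nil => rfl
  | cons z l ih =>
    simp only [List.foldl_cons]
    rw [show max (max m y) z = max (max m z) y by omega, ih]

theorem pvFoldMax_mem_absorb (l : List Int) (m y : Int) (hy : y ∈ l) :
    l.foldl max (max m y) = l.foldl max m := by
  rw [pvFoldMax_pull]
  have := (PySem.List.le_foldl_max l m).2 y hy
  omega

theorem pvProds_prefix (xs : List Int) (cur : List Int) :
    (pvProds 1 cur) <+: ((pvSplitRec cur xs).flatMap (pvProds 1)) := by
  induction xs generalizing cur with
  | nil => simp [pvSplitRec]
  | cons x xs ih =>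
    by_cases h : x = 0
    · simp [pvSplitRec, h]
    · have := ih (cur ++ [x])
      rw [pvProds_append] at this
      exact (List.prefix_append _ _).trans (by simpa [pvSplitRec, h] using this)

theorem pvMain (xs cur : List Int) (m : Int) (hm : 0 ≤ m) (hp : cur.prod ≠ 0)
    (hd : ∀ y ∈ pvProds 1 cur, y ≤ m) :
    (xs.foldl pvStepA (m, cur.prod)).1
      = ((pvSplitRec cur xs).flatMap (pvProds 1)).foldl max m := by
  induction xs generalizing cur m with
  | nil =>
    simp only [List.foldl_nil, pvSplitRec, List.flatMap_cons, List.flatMap_nil, List.append_nil]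
    exact (pvFoldMax_absorb _ _ hd).symm
  | cons x xs ih =>
    by_cases h : x = 0
    · subst h
      have hstep : pvStepA (m, cur.prod) 0 = (m, 1) := by
        simp [pvStepA]; omega
      simp only [List.foldl_cons, hstep, pvSplitRec, reduceIte, List.flatMap_cons,
        List.foldl_append]
      rw [pvFoldMax_absorb _ _ hd]
      exact ih [] m hm (by simp) (by simp [pvProds])
    · have hx : cur.prod * x ≠ 0 := mul_ne_zero hp h
      have hstep : pvStepA (m, cur.prod) x = (max m (cur.prod * x), cur.prod * x) := by
        simp only [pvStepA, if_neg hx, Prod.mk.injEq]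
        refine ⟨?_, trivial⟩
        split_ifs <;> omega
      have hprod : (cur ++ [x]).prod = cur.prod * x := by simp
      have hd' : ∀ y ∈ pvProds 1 (cur ++ [x]), y ≤ max m (cur.prod * x) := by
        intro y hy
        rw [pvProds_append] at hy
        rcases List.mem_append.1 hy with hy | hy
        · have := hd y hy; omega
        · simp at hy; omega
      have hmem : cur.prod * x ∈ (pvSplitRec (cur ++ [x]) xs).flatMap (pvProds 1) := by
        apply (pvProds_prefix xs (cur ++ [x])).subset
        rw [pvProds_append]; simp
      simp only [List.foldl_cons, hstep, pvSplitRec, if_neg h]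
      have hih := ih (cur ++ [x]) (max m (cur.prod * x)) (by omega)
        (by rw [hprod]; exact hx) hd'
      rw [hprod] at hih
      rw [hih]
      exact pvFoldMax_mem_absorb _ _ _ hmem

-- ===== VERDICT (by name: the statement is the Claim_ definition above) =====
theorem max_prod_sum_spec : Claim_equal_max_prod_sum := by
  intro a _
  show max_prod_sum a = max_prod_sum_alt a
  unfold max_prod_sum
  rw [PySem.List.len_eq, PySem.List.foldl_pyRange_zero_pyGetD']
  rw [pvAlt_eq]
  have := pvMain a [] 0 le_rfl (by simp) (by simp [pvProds])
  simpa using this
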